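-- pv_equiv track=rewrite | github.com/avanitanna/fake-news-detection | reformat/depth_controller.py | create_graph_dicts
-- ===== SOURCE A (Python) =====
-- def create_graph_dicts(node_graph_id):
--     node_graph = dict()
--     graph_node_count = dict()
--     for node_id in range(len(node_graph_id)):
--         graph_id = int(node_graph_id[node_id])
--         if graph_id not in graph_node_count:
--             graph_node_count[int(node_graph_id[node_id])] = 0
--         if graph_id not in node_graph:
--             node_graph[int(node_graph_id[node_id])] = []
--         node_graph[int(node_graph_id[node_id])].append(node_id)
--         graph_node_count[int(node_graph_id[node_id])]+=1
--     return node_graph, graph_node_count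
-- ===== SOURCE B (Python) =====
-- def create_graph_dicts(node_graph_id):
--     # Alternative: collect distinct graph ids first, then build each entry by
--     # a per-key scan (comprehensions), instead of incrementally updating dicts.
--     ids = [int(x) for x in node_graph_id]
--     seen = set()
--     order = []
--     for g in ids:
--         if g not in seen:
--             seen.add(g)
--             order.append(g)
--     node_graph = {g: [i for i, x in enumerate(ids) if x == g] for g in order}
--     graph_node_count = {g: ids.count(g) for g in order}
--     return node_graph, graph_node_count
-- ===== Notes on version B (the rewrite author's own statement) =====
-- stated objective: alternative
-- what changed: Instead of one loop incrementally updating two dicts keyed by membership tests, B first computes the distinct graph ids in order of first appearance, then builds node_graph by a per-key filtering scan over enumerate(ids) and graph_node_count by per-key ids.count(g); it trades A's single incremental pass for staged whole-list scans per distinct key.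
import Mathlib
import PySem

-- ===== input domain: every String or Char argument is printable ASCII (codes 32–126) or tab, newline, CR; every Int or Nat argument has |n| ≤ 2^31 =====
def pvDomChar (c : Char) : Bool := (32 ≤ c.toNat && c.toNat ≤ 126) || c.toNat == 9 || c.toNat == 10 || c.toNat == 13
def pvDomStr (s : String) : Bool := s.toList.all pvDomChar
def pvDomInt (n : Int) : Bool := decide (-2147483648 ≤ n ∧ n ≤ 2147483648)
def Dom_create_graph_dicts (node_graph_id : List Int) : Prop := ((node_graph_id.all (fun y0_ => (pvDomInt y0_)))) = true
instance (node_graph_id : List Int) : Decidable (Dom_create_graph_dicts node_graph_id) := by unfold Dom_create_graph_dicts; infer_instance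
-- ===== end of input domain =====

-- B replaces A's single incremental two-dict loop by staged passes: distinct ids in
-- first-appearance order, then a per-key filtering scan for each entry (objective:
-- alternative). Equivalence is about the return value; neither mutates its argument.

-- ===== PORT A =====
-- Loop `for node_id in range(len(node_graph_id))`; the index is always in range, so
-- `int(node_graph_id[node_id])` (identity on int) is ported exactly by pyGetD with default 0.
def create_graph_dicts (node_graph_id : List Int) : (List (Int × List Int)) × (List (Int × Int)) :=
  let st := (PySem.List.pyRange 0 (PySem.List.len node_graph_id) 1).foldl
    (fun (s : PySem.Dict Int (List Int) × PySem.Dict Int Int) node_id =>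
      let graph_id := PySem.List.pyGetD node_graph_id node_id 0
      let cnt := if s.2.contains graph_id then s.2 else s.2.insert graph_id 0
      let ng := if s.1.contains graph_id then s.1 else s.1.insert graph_id []
      let ng := ng.modify graph_id [] (fun l => l ++ [node_id])
      let cnt := cnt.modify graph_id 0 (fun c => c + 1)
      (ng, cnt))
    (PySem.Dict.empty, PySem.Dict.empty)
  (st.1.items, st.2.items)

-- ===== PORT B =====
-- `int(x)` is the identity on int; the seen/order loop, then the two dict
-- comprehensions over `order` as list maps (association lists in key order).
def create_graph_dicts_alt (node_graph_id : List Int) : (List (Int × List Int)) × (List (Int × Int)) :=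
  let ids := node_graph_id.map (fun x => x)
  let so := ids.foldl
    (fun (s : PySem.Set Int × List Int) g =>
      if !s.1.contains g then (PySem.Set.add s.1 g, s.2 ++ [g]) else s)
    (PySem.Set.empty, [])
  let order := so.2
  let node_graph := order.map (fun g =>
    (g, ((PySem.List.enumerate ids 0).filter (fun p => p.2 == g)).map (fun p => p.1)))
  let graph_node_count := order.map (fun g => (g, (PySem.List.count ids g : Int)))
  (node_graph, graph_node_count)

-- ===== PRECONDITION & SPEC =====
def Spec_create_graph_dicts (node_graph_id : List Int) (out : (List (Int × List Int)) × (List (Int × Int))) : Prop := out = create_graph_dicts_alt node_graph_id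
instance (node_graph_id : List Int) (out : (List (Int × List Int)) × (List (Int × Int))) : Decidable (Spec_create_graph_dicts node_graph_id out) := by unfold Spec_create_graph_dicts; infer_instance

-- ===== CLAIM (what is proved, stated in full; the proofs are below) =====
def Claim_equal_create_graph_dicts : Prop := ∀ (node_graph_id : List Int), Dom_create_graph_dicts node_graph_id → Spec_create_graph_dicts node_graph_id (create_graph_dicts node_graph_id)

-- ===== LEMMAS AND PROOFS =====

-- the count dict as a function of the grouping dict: same keys, values replaced by lengths
def pvMapLen (d : PySem.Dict Int (List Int)) : PySem.Dict Int Int :=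
  PySem.Dict.mk (d.items.map (fun q => (q.1, (q.2.length : Int))))

theorem pv_get?_mapLen (d : PySem.Dict Int (List Int)) (k : Int) :
    (pvMapLen d).get? k = (d.get? k).map (fun v => (v.length : Int)) := by
  obtain ⟨l⟩ := d
  induction l with
  | nil => rfl
  | cons p t ih =>
    show (PySem.Dict.mk ((p.1, (p.2.length : Int)) :: (pvMapLen (PySem.Dict.mk t)).items)).get? k
        = ((PySem.Dict.mk (p :: t)).get? k).map (fun v => (v.length : Int))
    rw [PySem.Dict.get?_mk_cons, PySem.Dict.get?_mk_cons]
    by_cases h : (p.1 == k) = true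
    · rw [if_pos h, if_pos h]; rfl
    · rw [if_neg h, if_neg h]; exact ih

theorem pv_contains_mapLen (d : PySem.Dict Int (List Int)) (k : Int) :
    (pvMapLen d).contains k = d.contains k := by
  rw [PySem.Dict.contains_eq_isSome_get?, PySem.Dict.contains_eq_isSome_get?, pv_get?_mapLen]
  cases d.get? k <;> simp

theorem pv_mapLen_insert (d : PySem.Dict Int (List Int)) (k : Int) (v : List Int) :
    pvMapLen (d.insert k v) = (pvMapLen d).insert k ((v.length : Int)) := by
  apply PySem.Dict.ext
  show (d.insert k v).items.map (fun q => (q.1, (q.2.length : Int)))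
      = ((pvMapLen d).insert k ((v.length : Int))).items
  rw [PySem.Dict.items_insert, PySem.Dict.items_insert, pv_contains_mapLen]
  by_cases h : d.contains k = true
  · simp only [h, if_true, List.map_map]
    show _ = (d.items.map (fun q => (q.1, (q.2.length : Int)))).map
        (fun p => if p.1 == k then (k, (v.length : Int)) else p)
    rw [List.map_map]
    apply List.map_congr_left
    intro p _
    by_cases hp : p.1 = k <;> simp [hp]
  · simp [h, pvMapLen]

-- A's per-iteration update of the count dict is pvMapLen of its update of the grouping dict
theorem pv_step_cnt (ng : PySem.Dict Int (List Int)) (g j : Int) :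
    ((if (pvMapLen ng).contains g then pvMapLen ng else (pvMapLen ng).insert g 0).modify g 0
       (fun c => c + 1)) =
    pvMapLen (ng.insert g (ng.getD g [] ++ [j])) := by
  rw [pv_mapLen_insert, pv_contains_mapLen]
  by_cases h : ng.contains g = true
  · rw [if_pos h]
    show (pvMapLen ng).insert g ((pvMapLen ng).getD g 0 + 1) = _
    obtain ⟨v, hv⟩ : ∃ v, ng.get? g = some v := by
      cases e : ng.get? g with
      | none => rw [PySem.Dict.contains_eq_isSome_get?, e] at h; simp at h
      | some v => exact ⟨v, rfl⟩
    congr 1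
    rw [PySem.Dict.getD_eq_get?_getD, pv_get?_mapLen, hv,
        PySem.Dict.getD_eq_get?_getD, hv]
    simp
  · rw [if_neg h]
    show ((pvMapLen ng).insert g 0).insert g (((pvMapLen ng).insert g 0).getD g 0 + 1) = _
    rw [PySem.Dict.insert_insert_self, PySem.Dict.getD_insert_self,
        PySem.Dict.getD_of_not_contains ng [] (by simpa using h)]
    rfl

-- ng-side: A's "if absent, insert empty, then append" equals a single insert of getD++[j]
theorem pv_step_ng (ng : PySem.Dict Int (List Int)) (g j : Int) :
    ((if ng.contains g then ng else ng.insert g []).modify g [] (fun l => l ++ [j])) =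
    ng.insert g (ng.getD g [] ++ [j]) := by
  by_cases h : ng.contains g = true
  · rw [if_pos h]; rfl
  · rw [if_neg h]
    show (ng.insert g []).insert g ((ng.insert g []).getD g [] ++ [j]) = _
    rw [PySem.Dict.insert_insert_self, PySem.Dict.getD_insert_self,
        PySem.Dict.getD_of_not_contains ng [] (by simpa using h)]

-- A's two-dict loop collapses to the single grouping fold plus pvMapLen
theorem pv_loop (key : Int → Int) (l : List Int) (ng : PySem.Dict Int (List Int)) :
    l.foldl
      (fun (s : PySem.Dict Int (List Int) × PySem.Dict Int Int) j =>
        let g := key j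
        let cnt := if s.2.contains g then s.2 else s.2.insert g 0
        let ng' := if s.1.contains g then s.1 else s.1.insert g []
        let ng' := ng'.modify g [] (fun t => t ++ [j])
        let cnt := cnt.modify g 0 (fun c => c + 1)
        (ng', cnt))
      (ng, pvMapLen ng) =
    (let ngf := l.foldl (fun d j => d.insert (key j) (d.getD (key j) [] ++ [j])) ng
     (ngf, pvMapLen ngf)) := by
  induction l generalizing ng with
  | nil => rfl
  | cons j t ih =>
    simp only [List.foldl_cons]
    rw [pv_step_ng, pv_step_cnt ng (key j) j]
    exact ih _

theorem pv_mapLen_empty : pvMapLen PySem.Dict.empty = PySem.Dict.empty := rfl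

-- B's seen/order loop: both components track the same first-appearance list
theorem pv_seen_order (l : List Int) (t : PySem.Set Int) :
    l.foldl
      (fun (s : PySem.Set Int × List Int) g =>
        if !s.1.contains g then (PySem.Set.add s.1 g, s.2 ++ [g]) else s)
      (t, t) =
    (l.foldl PySem.Set.add t, l.foldl PySem.Set.add t) := by
  induction l generalizing t with
  | nil => rfl
  | cons g rest ih =>
    simp only [List.foldl_cons]
    by_cases h : g ∈ t
    · rw [PySem.Set.add_of_mem h]
      simpa [h] using ih t
    · rw [PySem.Set.add_of_not_mem h]
      simpa [h] using ih (t ++ [g])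

-- the grouping dict of A, characterised: keys = distinct ids in order, value = filtered indices
theorem pv_ngf_items (xs : List Int) :
    ((PySem.List.enumerate xs 0).foldl
        (fun (d : PySem.Dict Int (List Int)) p => d.insert p.2 (d.getD p.2 [] ++ [p.1]))
        PySem.Dict.empty).items =
    (PySem.Set.ofList xs).map (fun g =>
      (g, ((PySem.List.enumerate xs 0).filter (fun p => p.2 == g)).map (fun p => p.1))) := by
  -- rewrite insert-of-getD-append as modify, and loop over the swapped pairs
  have hswap : ∀ (d : PySem.Dict Int (List Int)),
      (PySem.List.enumerate xs 0).foldl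
        (fun d p => d.insert p.2 (d.getD p.2 [] ++ [p.1])) d =
      ((PySem.List.enumerate xs 0).map (fun p => (p.2, p.1))).foldl
        (fun d p => d.modify p.1 [] (fun v => v ++ [p.2])) d := by
    intro d; rw [List.foldl_map]; rfl
  rw [hswap]
  set ps := (PySem.List.enumerate xs 0).map (fun p => (p.2, p.1)) with hps
  set D := ps.foldl (fun (d : PySem.Dict Int (List Int)) p => d.modify p.1 [] (fun v => v ++ [p.2]))
      PySem.Dict.empty with hD
  have hkeys : D.keys = PySem.Set.ofList xs := by
    rw [hD, PySem.Dict.keys_foldl_modify_key]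
    have : ps.map (fun p => p.1) = xs := by
      rw [hps, List.map_map]
      exact PySem.List.map_snd_enumerate xs 0
    rw [this]; rfl
  have hnd : D.keys.Nodup := by rw [hkeys]; exact PySem.Set.nodup_ofList xs
  rw [PySem.Dict.items_eq_map_keys D hnd [], hkeys]
  apply List.map_congr_left
  intro g _
  have hget : D.getD g [] = (ps.filter (fun p => p.1 == g)).map (fun p => p.2) := by
    rw [hD]
    simpa using PySem.Dict.getD_foldl_modify_append ps PySem.Dict.empty g
  rw [hget, hps, List.filter_map, List.map_map]
  rfl

-- lengths of the grouped lists are counts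
theorem pv_len_filter_eq_count (xs : List Int) (g : Int) :
    ((((PySem.List.enumerate xs 0).filter (fun p => p.2 == g)).map
        (fun p => p.1)).length : Int) = PySem.List.count xs g := by
  rw [List.length_map, PySem.List.count_eq]
  congr 1
  conv_rhs => rw [← PySem.List.map_snd_enumerate xs 0]
  rw [List.count, List.countP_map, List.countP_eq_length_filter]
  rfl

-- ===== VERDICT (by name: the statement is the Claim_ definition above) =====
theorem create_graph_dicts_spec : Claim_equal_create_graph_dicts := by
  intro xs _
  unfold Spec_create_graph_dicts create_graph_dicts create_graph_dicts_alt
  rw [← pv_mapLen_empty, pv_loop (fun j => PySem.List.pyGetD xs j 0)]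
  simp only [List.map_id']
  rw [show (PySem.Set.empty : PySem.Set Int) = ([] : List Int) from rfl]
  rw [pv_seen_order xs []]
  have hA : (PySem.List.pyRange 0 (PySem.List.len xs) 1).foldl
      (fun (d : PySem.Dict Int (List Int)) j =>
        d.insert (PySem.List.pyGetD xs j 0) (d.getD (PySem.List.pyGetD xs j 0) [] ++ [j]))
      PySem.Dict.empty =
      (PySem.List.enumerate xs 0).foldl
        (fun d p => d.insert p.2 (d.getD p.2 [] ++ [p.1])) PySem.Dict.empty := by
    rw [PySem.List.enumerate_eq_map_pyRange (d := 0), List.foldl_map]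
  rw [hA]
  rw [Prod.ext_iff]
  constructor
  · exact pv_ngf_items xs
  · show (pvMapLen _).items = _
    have : ∀ (d : PySem.Dict Int (List Int)),
        (pvMapLen d).items = d.items.map (fun q => (q.1, (q.2.length : Int))) := fun d => rfl
    rw [this, pv_ngf_items xs, List.map_map]
    have hfold : (xs.foldl PySem.Set.add ([] : List Int)) = PySem.Set.ofList xs := rfl
    rw [hfold]
    apply List.map_congr_left
    intro g _
    simp only [Function.comp]
    rw [pv_len_filter_eq_count xs g]
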